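-- pv_equiv track=rewrite | github.com/sandyboypraper/rappo-backed-django | apis/rhymeAlgo.py | findRhyme
-- ===== SOURCE A (Python) =====
-- vowels_set = {'aey','aa', 'ee', 'oo', 'ai', 'ae', 'au', 'a', 'e' , 'i', 'o' ,'u'}
--
-- def isContainsAnyVowel(word):
--     for e in vowels_set:
--         if e in word:
--             return True
--     return False
--
-- def clean(word):
--     if word[-1] == '-':
--         return word[0:-1]
--     else:
--         return word
--
-- def findRhyme(word, ansPrefix):
--     if word == '':
--         return clean(ansPrefix)
--
--     if not isContainsAnyVowel(word = word):
--         return ansPrefix + 'a'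
--
--     if not (word[0] in vowels_set):
--         if not (word[1] in vowels_set) and word[1] != 'h':
--             if not (word[2] in vowels_set) and word[2] != 'h':
--                 return findRhyme(word = word[3:],ansPrefix = ansPrefix + 'a-')
--             else:
--                 return findRhyme(word = word[2:],ansPrefix = ansPrefix + '^-')
--         return findRhyme(word = word[1:],ansPrefix = ansPrefix)
--     else:
--         #case for last a;
--         if len(word) == 1 and word[0] == 'a':
--             return findRhyme(word = word[1:], ansPrefix = ansPrefix + word[0] + 'a')
--         if (word[0:2] in vowels_set):
--             if(word[0:3] in vowels_set):
--                 return findRhyme(word = word[3:], ansPrefix = ansPrefix + word[0:3] + '-')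
--             else:
--                 return findRhyme(word = word[2:], ansPrefix = ansPrefix + word[0:2] + '-')
--         else:
--             return findRhyme(word = word[1:], ansPrefix = ansPrefix + word[0] + '-')
-- ===== SOURCE B (Python) =====
-- # Single left-to-right pass over the word with an index and a precomputed last-vowel
-- # position, collecting output pieces in a list joined once at the end, instead of
-- # A's recursion that re-scans the whole remaining suffix for a vowel at every step.
-- VOWELS = 'aeiou'
-- MULTI2 = {'aa', 'ee', 'oo', 'ai', 'ae', 'au'}
--
-- def findRhyme(word, ansPrefix):
--     n = len(word)
--     last = -1                      # index of the last vowel letter in word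
--     for j in range(n):
--         if word[j] in VOWELS:
--             last = j
--     parts = [ansPrefix]
--     i = 0
--     while i < n:
--         if i > last:               # no vowel left: tail maps to a bare 'a'
--             parts.append('a')
--             return ''.join(parts)
--         c = word[i]
--         if c not in VOWELS:
--             if word[i + 1] in VOWELS or word[i + 1] == 'h':
--                 i += 1
--             elif word[i + 2] in VOWELS or word[i + 2] == 'h':
--                 parts.append('^-')
--                 i += 2
--             else:
--                 parts.append('a-')
--                 i += 3
--         else:
--             if i == n - 1 and c == 'a':
--                 parts.append('aa')
--                 i += 1
--             elif word[i:i + 3] == 'aey':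
--                 parts.append('aey-')
--                 i += 3
--             elif word[i:i + 2] in MULTI2:
--                 parts.append(word[i:i + 2] + '-')
--                 i += 2
--             else:
--                 parts.append(c + '-')
--                 i += 1
--     s = ''.join(parts)
--     return s[:-1] if s.endswith('-') else s
-- ===== Notes on version B (the rewrite author's own statement) =====
-- stated objective: faster
-- what changed: Replaced A's suffix recursion, which rebuilds the remaining word by slicing and re-scans the whole suffix for a vowel at every step, by a single indexed left-to-right pass that precomputes the last vowel position once and collects output pieces in a list joined at the end.
import Mathlib
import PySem

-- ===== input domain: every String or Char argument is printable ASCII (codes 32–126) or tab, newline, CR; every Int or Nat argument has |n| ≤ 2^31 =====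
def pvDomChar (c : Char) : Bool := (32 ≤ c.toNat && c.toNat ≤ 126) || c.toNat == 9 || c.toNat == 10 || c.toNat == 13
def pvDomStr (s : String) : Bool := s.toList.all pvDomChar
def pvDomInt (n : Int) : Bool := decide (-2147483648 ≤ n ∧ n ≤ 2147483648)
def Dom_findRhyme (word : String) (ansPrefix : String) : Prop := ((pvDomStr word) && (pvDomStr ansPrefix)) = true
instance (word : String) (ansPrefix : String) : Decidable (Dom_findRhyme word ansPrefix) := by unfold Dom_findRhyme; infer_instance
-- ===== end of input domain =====

-- B replaces A's suffix recursion (which re-scans the whole remaining word for a vowel at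
-- every step) by one left-to-right indexed pass with a precomputed last-vowel position,
-- collecting output pieces in a list joined once at the end.

-- word[i] for both ports; Python raises IndexError out of range — unreachable under the
-- guards of either program (every indexed position is before a known vowel position)
def charAt (w : List Char) (i : Int) : Char := (PySem.List.pyGet? w i).getD ' '

-- ===== PORT A =====
-- vowels_set = {'aey','aa','ee','oo','ai','ae','au','a','e','i','o','u'}  (a Python set of strings)
def vowelsSetA : PySem.Set (List Char) :=
  PySem.Set.ofList [['a','e','y'],['a','a'],['e','e'],['o','o'],['a','i'],['a','e'],['a','u'],
                    ['a'],['e'],['i'],['o'],['u']]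

-- for e in vowels_set: if e in word: return True / return False  (a Bool any; set order irrelevant)
def isContainsAnyVowelA (w : List Char) : Bool := vowelsSetA.any (fun e => PySem.Chars.isIn e w)

-- clean: if word[-1] == '-': return word[0:-1] else word  (word = '' raises IndexError: excluded by Pre_)
def cleanA (w : List Char) : List Char :=
  match PySem.List.pyGet? w (-1) with
  | none => []      -- Python raises IndexError here; outside Pre_
  | some c => if c = '-' then PySem.List.slice w (some 0) (some (-1)) else w

def findRhymeAux (w pre : List Char) : List Char :=
  if _hw : w = [] then cleanA pre
  else if !(isContainsAnyVowelA w) then pre ++ ['a']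
  else if !(PySem.Set.contains vowelsSetA [charAt w 0]) then
    if !(PySem.Set.contains vowelsSetA [charAt w 1]) && (charAt w 1 != 'h') then
      if !(PySem.Set.contains vowelsSetA [charAt w 2]) && (charAt w 2 != 'h') then
        findRhymeAux (PySem.List.slice w (some 3) none) (pre ++ ['a','-'])
      else
        findRhymeAux (PySem.List.slice w (some 2) none) (pre ++ ['^','-'])
    else
      findRhymeAux (PySem.List.slice w (some 1) none) pre
  else
    if PySem.Chars.len w == 1 && (charAt w 0 == 'a') then
      findRhymeAux (PySem.List.slice w (some 1) none) (pre ++ [charAt w 0] ++ ['a'])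
    else if PySem.Set.contains vowelsSetA (PySem.List.slice w (some 0) (some 2)) then
      if PySem.Set.contains vowelsSetA (PySem.List.slice w (some 0) (some 3)) then
        findRhymeAux (PySem.List.slice w (some 3) none) (pre ++ PySem.List.slice w (some 0) (some 3) ++ ['-'])
      else
        findRhymeAux (PySem.List.slice w (some 2) none) (pre ++ PySem.List.slice w (some 0) (some 2) ++ ['-'])
    else
      findRhymeAux (PySem.List.slice w (some 1) none) (pre ++ [charAt w 0] ++ ['-'])
termination_by w.length
decreasing_by
  all_goals
    simp [pysem]
    have : w.length ≠ 0 := by simpa [List.length_eq_zero_iff] using _hw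
    omega

def findRhyme (word : String) (ansPrefix : String) : String :=
  String.ofList (findRhymeAux word.toList ansPrefix.toList)

-- ===== PORT B =====
-- VOWELS = 'aeiou'; `c in VOWELS` is a substring test on the 1-char string
def vowelsB : List Char := ['a','e','i','o','u']
-- MULTI2 = {'aa','ee','oo','ai','ae','au'}
def multi2B : PySem.Set (List Char) :=
  PySem.Set.ofList [['a','a'],['e','e'],['o','o'],['a','i'],['a','e'],['a','u']]

-- last = -1; for j in range(n): if word[j] in VOWELS: last = j
def lastVowelB (w : List Char) (n : Int) : Int :=
  (PySem.List.pyRange 0 n 1).foldl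
    (fun last j => if PySem.Chars.isIn [charAt w j] vowelsB then j else last) (-1)

-- the while loop (index i, parts accumulator), then the final join + trailing-dash strip
def loopB (w : List Char) (n : Nat) (last : Int) (i : Nat) (parts : List (List Char)) : List Char :=
  if _h : i < n then
    if (i : Int) > last then
      PySem.Chars.join [] (parts ++ [['a']])
    else
      let c := charAt w (i : Int)
      if !(PySem.Chars.isIn [c] vowelsB) then
        if PySem.Chars.isIn [charAt w ((i:Int)+1)] vowelsB || (charAt w ((i:Int)+1) == 'h') then
          loopB w n last (i+1) parts
        else if PySem.Chars.isIn [charAt w ((i:Int)+2)] vowelsB || (charAt w ((i:Int)+2) == 'h') then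
          loopB w n last (i+2) (parts ++ [['^','-']])
        else
          loopB w n last (i+3) (parts ++ [['a','-']])
      else
        if i == n - 1 && c == 'a' then
          loopB w n last (i+1) (parts ++ [['a','a']])
        else if PySem.List.slice w (some (i:Int)) (some ((i:Int)+3)) = ['a','e','y'] then
          loopB w n last (i+3) (parts ++ [['a','e','y','-']])
        else if PySem.Set.contains multi2B (PySem.List.slice w (some (i:Int)) (some ((i:Int)+2))) then
          loopB w n last (i+2) (parts ++ [PySem.List.slice w (some (i:Int)) (some ((i:Int)+2)) ++ ['-']])
        else
          loopB w n last (i+1) (parts ++ [[c,'-']])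
  else
    let s := PySem.Chars.join [] parts
    if PySem.Chars.endswith s ['-'] then PySem.List.slice s none (some (-1)) else s
termination_by n - i
decreasing_by all_goals omega

def findRhyme_alt (word : String) (ansPrefix : String) : String :=
  let w := word.toList
  let n := w.length
  String.ofList (loopB w n (lastVowelB w (n : Int)) 0 [ansPrefix.toList])

-- ===== PRECONDITION & SPEC =====
-- Pre_ excludes only word = '' with ansPrefix = '', where A's clean('') raises IndexError.
def Pre_findRhyme (word : String) (ansPrefix : String) : Prop := ¬ (word = "" ∧ ansPrefix = "")
instance (word : String) (ansPrefix : String) : Decidable (Pre_findRhyme word ansPrefix) := by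
  unfold Pre_findRhyme; infer_instance
def pvWitness_findRhyme : String × String := ("hello", "")

def Spec_findRhyme (word : String) (ansPrefix : String) (out : String) : Prop := out = findRhyme_alt word ansPrefix
instance (word : String) (ansPrefix : String) (out : String) : Decidable (Spec_findRhyme word ansPrefix out) := by
  unfold Spec_findRhyme; infer_instance

-- ===== CLAIM (what is proved, stated in full; the proofs are below) =====
def Claim_equal_findRhyme : Prop := ∀ (word : String) (ansPrefix : String), Dom_findRhyme word ansPrefix → Pre_findRhyme word ansPrefix → Spec_findRhyme word ansPrefix (findRhyme word ansPrefix)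

-- ===== LEMMAS AND PROOFS =====

theorem vA_lit : vowelsSetA = [['a','e','y'],['a','a'],['e','e'],['o','o'],['a','i'],['a','e'],['a','u'],['a'],['e'],['i'],['o'],['u']] := by decide
theorem m2_lit : multi2B = [['a','a'],['e','e'],['o','o'],['a','i'],['a','e'],['a','u']] := by decide

-- single characters: both membership tests are "c is one of a,e,i,o,u"
theorem isIn_single (c : Char) (l : List Char) : PySem.Chars.isIn [c] l = decide (c ∈ l) := by
  cases hb : PySem.Chars.isIn [c] l
  · rw [PySem.Chars.isIn_eq_false_iff, List.singleton_infix_iff] at hb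
    simp [hb]
  · rw [PySem.Chars.isIn_iff_infix, List.singleton_infix_iff] at hb
    simp [hb]

theorem containsA_single (c : Char) : PySem.Set.contains vowelsSetA [c] = decide (c ∈ vowelsB) := by
  rw [vA_lit]
  simp only [PySem.Set.contains, List.contains_eq_mem, vowelsB]
  apply decide_eq_decide.mpr
  simp [List.cons.injEq]

theorem containsA_pair (c d : Char) :
    PySem.Set.contains vowelsSetA [c,d] = PySem.Set.contains multi2B [c,d] := by
  rw [vA_lit, m2_lit]
  simp only [PySem.Set.contains, List.contains_eq_mem]
  apply decide_eq_decide.mpr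
  simp [List.cons.injEq]

theorem containsA_triple (c d e : Char) :
    PySem.Set.contains vowelsSetA [c,d,e] = decide ([c,d,e] = ['a','e','y']) := by
  rw [vA_lit]
  simp only [PySem.Set.contains, List.contains_eq_mem]
  apply decide_eq_decide.mpr
  simp [List.cons.injEq]

theorem join_nil_flatten : ∀ (ps : List (List Char)), PySem.Chars.join [] ps = ps.flatten := by
  intro ps
  induction ps with
  | nil => rfl
  | cons a t ih =>
    cases t with
    | nil => simp [PySem.Chars.join, List.intercalate]
    | cons b t2 =>
      simp [PySem.Chars.join, List.intercalate, List.intersperse] at ih ⊢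
      exact ih

-- A's vowel scan = "some character of w is a vowel letter"
theorem containsAny_eq_any (w : List Char) :
    isContainsAnyVowelA w = w.any (fun c => decide (c ∈ vowelsB)) := by
  cases ha : w.any (fun c => decide (c ∈ vowelsB))
  · rw [List.any_eq_false] at ha
    unfold isContainsAnyVowelA
    rw [List.any_eq_false]
    intro e he
    rw [Bool.not_eq_true, PySem.Chars.isIn_eq_false_iff]
    intro hinf
    obtain ⟨c, hce, hcv⟩ : ∃ c ∈ e, c ∈ vowelsB := by
      rw [vA_lit] at he
      simp only [List.mem_cons, List.not_mem_nil, or_false] at he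
      rcases he with rfl|rfl|rfl|rfl|rfl|rfl|rfl|rfl|rfl|rfl|rfl|rfl <;>
        first
          | exact ⟨'a', by decide, by decide⟩
          | exact ⟨'e', by decide, by decide⟩
          | exact ⟨'i', by decide, by decide⟩
          | exact ⟨'o', by decide, by decide⟩
          | exact ⟨'u', by decide, by decide⟩
    have hcw : c ∈ w := hinf.subset hce
    have := ha c hcw
    simp [hcv] at this
  · rw [List.any_eq_true] at ha
    obtain ⟨c, hcw, hcv⟩ := ha
    simp only [decide_eq_true_eq] at hcv
    unfold isContainsAnyVowelA
    rw [List.any_eq_true]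
    refine ⟨[c], ?_, ?_⟩
    · rw [vA_lit]
      simp only [vowelsB, List.mem_cons, List.not_mem_nil, or_false] at hcv
      rcases hcv with rfl|rfl|rfl|rfl|rfl <;> decide
    · rw [isIn_single]
      simpa using hcw

-- the fold of B's first loop: -1 if no vowel, else the largest vowel index below n
theorem lastVowel_spec (w : List Char) (n : Nat) :
    (lastVowelB w (n : Int) = -1 ∧ ∀ j : Nat, j < n → PySem.Chars.isIn [charAt w (j : Int)] vowelsB = false)
    ∨ (∃ k : Nat, lastVowelB w (n : Int) = (k : Int) ∧ k < n ∧
        PySem.Chars.isIn [charAt w (k : Int)] vowelsB = true ∧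
        ∀ j : Nat, k < j → j < n → PySem.Chars.isIn [charAt w (j : Int)] vowelsB = false) := by
  induction n with
  | zero =>
    left
    constructor
    · unfold lastVowelB
      rw [PySem.List.pyRange_one_eq_nil (by norm_num)]
      rfl
    · omega
  | succ n ih =>
    have hsplit : lastVowelB w ((n+1 : Nat) : Int)
        = (if PySem.Chars.isIn [charAt w (n : Int)] vowelsB then (n : Int) else lastVowelB w (n : Int)) := by
      unfold lastVowelB
      rw [show (((n+1 : Nat)) : Int) = (n : Int) + 1 by push_cast; ring,
          PySem.List.pyRange_one_succ_right (by positivity), List.foldl_append]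
      rfl
    cases hn : PySem.Chars.isIn [charAt w (n : Int)] vowelsB
    · rw [hsplit, hn]
      simp only [Bool.false_eq_true, if_false]
      rcases ih with ⟨h1, h2⟩ | ⟨k, h1, h2, h3, h4⟩
      · left
        refine ⟨h1, fun j hj => ?_⟩
        rcases Nat.lt_or_ge j n with h | h
        · exact h2 j h
        · have : j = n := by omega
          subst this; exact hn
      · right
        refine ⟨k, h1, by omega, h3, fun j hj1 hj2 => ?_⟩
        rcases Nat.lt_or_ge j n with h | h
        · exact h4 j hj1 h
        · have : j = n := by omega
          subst this; exact hn
    · right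
      refine ⟨n, ?_, by omega, hn, fun j hj1 hj2 => by omega⟩
      rw [hsplit, hn]
      simp

theorem cleanA_eq (pre : List Char) :
    cleanA pre = (if PySem.Chars.endswith pre ['-'] then PySem.List.slice pre none (some (-1)) else pre) := by
  rcases List.eq_nil_or_concat pre with rfl | ⟨q, c, rfl⟩
  · decide
  · simp only [List.concat_eq_append]
    have hget : PySem.List.pyGet? (q ++ [c]) (-1) = some c := by
      rw [show (-1 : Int) = -((1:Nat):Int) by norm_num]
      rw [PySem.List.pyGet?_neg_natCast] <;> simp
    have hend : PySem.Chars.endswith (q ++ [c]) ['-'] = decide (c = '-') := by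
      cases hb : PySem.Chars.endswith (q ++ [c]) ['-']
      · have hnc : ¬ (c = '-') := by
          intro hc
          subst hc
          rw [(PySem.Chars.endswith_iff _ _).mpr (List.suffix_append q ['-'])] at hb
          simp at hb
        simp [hnc]
      · rw [PySem.Chars.endswith_iff] at hb
        have h2 := List.IsSuffix.getLast hb (by simp)
        simp at h2
        simp [h2.symm]
    rw [cleanA, hget, hend]
    by_cases hc : c = '-' <;> simp [hc, PySem.List.slice_to_neg_one]

theorem joinApp (parts : List (List Char)) (x : List Char) :
    PySem.Chars.join [] (parts ++ [x]) = PySem.Chars.join [] parts ++ x := by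
  simp [join_nil_flatten]

theorem charAt_at (w : List Char) (j : Nat) (h : j < w.length) : charAt w (j:Int) = w[j] := by
  simp [charAt, PySem.List.pyGet?_natCast, List.getElem?_eq_getElem h]

theorem charAt_drop (w : List Char) (i k : Nat) :
    charAt (w.drop i) ((k:Nat):Int) = charAt w (((i+k:Nat)):Int) := by
  unfold charAt
  rw [PySem.List.pyGet?_natCast, PySem.List.pyGet?_natCast, List.getElem?_drop]

theorem any_drop_iff (w : List Char) (i : Nat) :
    (w.drop i).any (fun c => decide (c ∈ vowelsB)) = true
      ↔ ∃ j, i ≤ j ∧ j < w.length ∧ charAt w (j:Int) ∈ vowelsB := by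
  rw [List.any_eq_true]
  constructor
  · rintro ⟨c, hc, hcv⟩
    rw [List.mem_iff_getElem] at hc
    obtain ⟨t, ht, rfl⟩ := hc
    rw [List.getElem_drop] at hcv
    refine ⟨i + t, by omega, by simp at ht; omega, ?_⟩
    rw [charAt_at w (i+t) (by simp at ht; omega)]
    simpa using hcv
  · rintro ⟨j, hij, hjn, hjv⟩
    refine ⟨w[j], ?_, by rw [charAt_at w j hjn] at hjv; simpa using hjv⟩
    have : (w.drop i)[j - i]'(by simp; omega) = w[j] := by
      rw [List.getElem_drop]
      congr 1
      omega
    rw [← this]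
    exact List.getElem_mem _
theorem gt_last_iff (w : List Char) (i : Nat) :
    (lastVowelB w (w.length : Int) < (i:Int))
      ↔ (w.drop i).any (fun c => decide (c ∈ vowelsB)) = false := by
  rcases lastVowel_spec w w.length with ⟨h1, h2⟩ | ⟨k, h1, h2, h3, h4⟩
  · constructor
    · intro _
      rw [← Bool.not_eq_true, any_drop_iff]
      rintro ⟨j, hij, hjn, hjv⟩
      have := h2 j hjn
      rw [isIn_single] at this
      simp [hjv] at this
    · intro _
      rw [h1]
      omega
  · rw [h1]
    constructor
    · intro hlt
      have hki : k < i := by exact_mod_cast hlt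
      rw [← Bool.not_eq_true, any_drop_iff]
      rintro ⟨j, hij, hjn, hjv⟩
      have := h4 j (by omega) hjn
      rw [isIn_single] at this
      simp [hjv] at this
    · intro hany
      by_contra hge
      have hik : i ≤ k := by omega
      have hkv : charAt w (k:Int) ∈ vowelsB := by
        rw [isIn_single] at h3
        simpa using h3
      have := (any_drop_iff w i).mpr ⟨k, hik, h2, hkv⟩
      rw [hany] at this
      exact Bool.false_ne_true this

theorem m2_single (c : Char) : PySem.Set.contains multi2B [c] = false := by
  rw [m2_lit]
  simp only [PySem.Set.contains, List.contains_eq_mem]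
  simp

theorem sl1 (w : List Char) (i : Nat) :
    PySem.List.slice (w.drop i) (some 1) none = w.drop (i+1) := by
  simp [pysem]

theorem sl2 (w : List Char) (i : Nat) :
    PySem.List.slice (w.drop i) (some 2) none = w.drop (i+2) := by
  simp [pysem]

theorem sl3 (w : List Char) (i : Nat) :
    PySem.List.slice (w.drop i) (some 3) none = w.drop (i+3) := by
  simp [pysem]

theorem tA2 (w : List Char) (i : Nat) :
    PySem.List.slice (w.drop i) (some 0) (some 2) = (w.drop i).take 2 := by simp [pysem]

theorem tA3 (w : List Char) (i : Nat) :
    PySem.List.slice (w.drop i) (some 0) (some 3) = (w.drop i).take 3 := by simp [pysem]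

theorem tB2 (w : List Char) (i : Nat) :
    PySem.List.slice w (some (i:Int)) (some ((i:Int)+2)) = (w.drop i).take 2 := by
  have h := PySem.List.slice_natCast_add (xs:=w) (j:=i) (n:=2)
  push_cast at h
  rw [h]

theorem tB3 (w : List Char) (i : Nat) :
    PySem.List.slice w (some (i:Int)) (some ((i:Int)+3)) = (w.drop i).take 3 := by
  have h := PySem.List.slice_natCast_add (xs:=w) (j:=i) (n:=3)
  push_cast at h
  rw [h]

theorem hlenA (w : List Char) (i : Nat) :
    PySem.Chars.len (w.drop i) = ((w.length - i : Nat) : Int) := by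
  simp [PySem.Chars.len_eq]

theorem loopB_terminal (w : List Char) (last : Int) (i : Nat) (parts : List (List Char))
    (h : ¬ i < w.length) :
    loopB w w.length last i parts = findRhymeAux (w.drop i) (PySem.Chars.join [] parts) := by
  have hnd : w.drop i = [] := List.drop_eq_nil_of_le (by omega)
  rw [loopB, findRhymeAux, cleanA_eq]
  simp only [hnd, dif_neg h, dif_pos]

theorem main_loop (w : List Char) : ∀ (fuel i : Nat) (parts : List (List Char)),
    i ≤ w.length → w.length - i ≤ fuel →
    loopB w w.length (lastVowelB w (w.length : Int)) i parts
      = findRhymeAux (w.drop i) (PySem.Chars.join [] parts) := by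
  intro fuel
  induction fuel with
  | zero =>
    intro i parts h1 h2
    exact loopB_terminal w _ i parts (by omega)
  | succ fuel ih =>
    intro i parts h1 h2
    by_cases hin : i < w.length
    · have hs_cons : w.drop i = w[i] :: w.drop (i+1) := List.drop_eq_getElem_cons hin
      have hsne : w.drop i ≠ [] := by
        rw [hs_cons]
        exact List.cons_ne_nil _ _
      have e0 : charAt (w.drop i) 0 = charAt w (i:Int) := by simpa using charAt_drop w i 0
      have e1 : charAt (w.drop i) 1 = charAt w ((i:Int)+1) := by
        have := charAt_drop w i 1
        push_cast at this
        simpa using this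
      have e2 : charAt (w.drop i) 2 = charAt w ((i:Int)+2) := by
        have := charAt_drop w i 2
        push_cast at this
        simpa using this
      have gB0 : charAt w (i:Int) = w[i] := charAt_at w i hin
      by_cases hv : (w.drop i).any (fun c => decide (c ∈ vowelsB)) = true
      · -- a vowel remains: neither program takes the bare-'a' exit
        have hile : ¬ (lastVowelB w (w.length : Int) < (i:Int)) := by
          rw [gt_last_iff, hv]
          simp
        rw [loopB, findRhymeAux, dif_pos hin, dif_neg hsne, if_neg hile,
            containsAny_eq_any, hv]
        simp only [Bool.not_true, Bool.false_eq_true, if_false]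
        by_cases hc : w[i] ∈ vowelsB
        · -- first character is a vowel
          rw [if_neg (show ¬ ((!(PySem.Chars.isIn [charAt w (i:Int)] vowelsB)) = true) by
                rw [gB0, isIn_single]; simp [hc]),
              if_neg (show ¬ ((!(PySem.Set.contains vowelsSetA [charAt (w.drop i) 0])) = true) by
                rw [e0, gB0, containsA_single]; simp [hc]),
              tA2 w i, tA3 w i, tB2 w i, tB3 w i, sl1 w i, sl2 w i, sl3 w i, hlenA w i]
          by_cases haa : (i = w.length - 1 ∧ w[i] = 'a')
          · obtain ⟨ha1, ha2⟩ := haa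
            rw [if_pos (show (i == w.length - 1 && charAt w (i:Int) == 'a') = true by
                  rw [gB0, ha2]; simp [ha1]),
                if_pos (show ((((w.length - i : Nat):Int)) == 1 && charAt (w.drop i) 0 == 'a') = true by
                  rw [e0, gB0, ha2]
                  have : w.length - i = 1 := by omega
                  simp [this]),
                ih (i+1) (parts ++ [['a','a']]) (by omega) (by omega),
                joinApp, e0, gB0, ha2]
            simp
          · rw [if_neg (show ¬ ((i == w.length - 1 && charAt w (i:Int) == 'a') = true) by
                  rw [gB0]; simpa using fun a b => haa ⟨a, b⟩),
                if_neg (show ¬ (((((w.length - i : Nat):Int)) == 1 && charAt (w.drop i) 0 == 'a') = true) by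
                  rw [e0, gB0]
                  simp only [Bool.and_eq_true, beq_iff_eq]
                  rintro ⟨hl, ha⟩
                  have : w.length - i = 1 := by exact_mod_cast hl
                  exact haa ⟨by omega, ha⟩)]
            by_cases hone : i + 1 = w.length
            · -- the suffix is a single vowel ≠ 'a'
              have hca : w[i] ≠ 'a' := fun h => haa ⟨by omega, h⟩
              have hs1 : w.drop i = [w[i]] := by
                rw [hs_cons, List.drop_eq_nil_of_le (by omega)]
              have htk2 : ([w[i]] : List Char).take 2 = [w[i]] := rfl
              have htk3 : ([w[i]] : List Char).take 3 = [w[i]] := rfl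
              rw [if_pos (show PySem.Set.contains vowelsSetA ((w.drop i).take 2) = true by
                    rw [hs1, htk2, containsA_single]; simp [hc]),
                  if_pos (show PySem.Set.contains vowelsSetA ((w.drop i).take 3) = true by
                    rw [hs1, htk3, containsA_single]; simp [hc]),
                  if_neg (show ¬ ((w.drop i).take 3 = ['a','e','y']) by rw [hs1, htk3]; simp),
                  if_neg (show ¬ (PySem.Set.contains multi2B ((w.drop i).take 2) = true) by
                    rw [hs1, htk2, m2_single]; simp),
                  ih (i+1) (parts ++ [[charAt w (i:Int),'-']]) (by omega) (by omega),
                  joinApp, hs1, htk3, gB0,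
                  show w.drop (i+1) = [] from List.drop_eq_nil_of_le (by omega),
                  show w.drop (i+3) = [] from List.drop_eq_nil_of_le (by omega)]
              simp
            · have h1n : i + 1 < w.length := by omega
              have gB1 : charAt w ((i:Int)+1) = w[i+1] := by
                rw [show ((i:Int)+1) = (((i+1:Nat)):Int) by push_cast; ring]
                exact charAt_at w (i+1) h1n
              have ht2 : (w.drop i).take 2 = [w[i], w[i+1]] := by
                rw [hs_cons, List.drop_eq_getElem_cons h1n]
                rfl
              by_cases hm : PySem.Set.contains multi2B [w[i], w[i+1]] = true
              · by_cases hthree : i + 2 < w.length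
                · have ht3 : (w.drop i).take 3 = [w[i], w[i+1], w[i+2]] := by
                    rw [hs_cons, List.drop_eq_getElem_cons h1n,
                        List.drop_eq_getElem_cons hthree]
                    rfl
                  by_cases hy : [w[i], w[i+1], w[i+2]] = ['a','e','y']
                  · rw [if_pos (show PySem.Set.contains vowelsSetA ((w.drop i).take 2) = true by
                          rw [ht2, containsA_pair]; exact hm),
                        if_pos (show PySem.Set.contains vowelsSetA ((w.drop i).take 3) = true by
                          rw [ht3, containsA_triple]; simp [hy]),
                        if_pos (show (w.drop i).take 3 = ['a','e','y'] by rw [ht3, hy]),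
                        ih (i+3) (parts ++ [['a','e','y','-']]) (by omega) (by omega),
                        joinApp, ht3, hy]
                    simp
                  · rw [if_pos (show PySem.Set.contains vowelsSetA ((w.drop i).take 2) = true by
                          rw [ht2, containsA_pair]; exact hm),
                        if_neg (show ¬ (PySem.Set.contains vowelsSetA ((w.drop i).take 3) = true) by
                          rw [ht3, containsA_triple]; simp [hy]),
                        if_neg (show ¬ ((w.drop i).take 3 = ['a','e','y']) by rw [ht3]; exact hy),
                        if_pos (show PySem.Set.contains multi2B ((w.drop i).take 2) = true by
                          rw [ht2]; exact hm),
                        ih (i+2) (parts ++ [(w.drop i).take 2 ++ ['-']]) (by omega) (by omega),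
                        joinApp]
                    simp
                · -- exactly two characters left
                  have hs2 : w.drop i = [w[i], w[i+1]] := by
                    rw [hs_cons, List.drop_eq_getElem_cons h1n,
                        List.drop_eq_nil_of_le (by omega)]
                  have ht3 : (w.drop i).take 3 = [w[i], w[i+1]] := by
                    rw [hs2]
                    rfl
                  rw [if_pos (show PySem.Set.contains vowelsSetA ((w.drop i).take 2) = true by
                        rw [ht2, containsA_pair]; exact hm),
                      if_pos (show PySem.Set.contains vowelsSetA ((w.drop i).take 3) = true by
                        rw [ht3, containsA_pair]; exact hm),
                      if_neg (show ¬ ((w.drop i).take 3 = ['a','e','y']) by rw [ht3]; simp),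
                      if_pos (show PySem.Set.contains multi2B ((w.drop i).take 2) = true by
                        rw [ht2]; exact hm),
                      ih (i+2) (parts ++ [(w.drop i).take 2 ++ ['-']]) (by omega) (by omega),
                      joinApp, ht2, ht3]
                  rw [show w.drop (i+3) = [] from List.drop_eq_nil_of_le (by omega),
                      show w.drop (i+2) = [] from List.drop_eq_nil_of_le (by omega)]
                  simp
              · rw [if_neg (show ¬ (PySem.Set.contains vowelsSetA ((w.drop i).take 2) = true) by
                      rw [ht2, containsA_pair]; exact hm),
                    if_neg (show ¬ ((w.drop i).take 3 = ['a','e','y']) by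
                      intro h
                      have h2 : (w.drop i).take 2 = ['a','e'] := by
                        have : ((w.drop i).take 3).take 2 = (w.drop i).take 2 := by
                          rw [List.take_take]
                          norm_num
                        rw [← this, h]
                        rfl
                      rw [ht2] at h2
                      apply hm
                      rw [h2]
                      decide),
                    if_neg (show ¬ (PySem.Set.contains multi2B ((w.drop i).take 2) = true) by
                      rw [ht2]; exact hm),
                    ih (i+1) (parts ++ [[charAt w (i:Int), '-']]) (by omega) (by omega),
                    joinApp, e0, gB0]
                simp
        · -- first character is a consonant; a vowel lies strictly further right
          obtain ⟨j, hij, hjn, hjv⟩ := (any_drop_iff w i).mp hv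
          have hjgt : i < j := by
            rcases Nat.lt_or_ge i j with h | h
            · exact h
            · exfalso
              have : j = i := by omega
              subst this
              rw [charAt_at w j hjn] at hjv
              exact hc hjv
          have h1n : i + 1 < w.length := by omega
          have gB1 : charAt w ((i:Int)+1) = w[i+1] := by
            rw [show ((i:Int)+1) = (((i+1:Nat)):Int) by push_cast; ring]
            exact charAt_at w (i+1) h1n
          rw [if_pos (show (!(PySem.Chars.isIn [charAt w (i:Int)] vowelsB)) = true by
                rw [gB0, isIn_single]; simp [hc]),
              if_pos (show (!(PySem.Set.contains vowelsSetA [charAt (w.drop i) 0])) = true by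
                rw [e0, gB0, containsA_single]; simp [hc])]
          by_cases hd : (w[i+1] ∈ vowelsB ∨ w[i+1] = 'h')
          · rw [if_pos (show (PySem.Chars.isIn [charAt w ((i:Int)+1)] vowelsB
                    || (charAt w ((i:Int)+1) == 'h')) = true by
                  rw [gB1, isIn_single]; rcases hd with h | h <;> simp [h]),
                if_neg (show ¬ (((!(PySem.Set.contains vowelsSetA [charAt (w.drop i) 1]))
                    && (charAt (w.drop i) 1 != 'h')) = true) by
                  rw [e1, gB1, containsA_single]; rcases hd with h | h <;> simp [h]),
                sl1 w i]
            exact ih (i+1) parts (by omega) (by omega)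
          · push_neg at hd
            obtain ⟨hd1, hd2⟩ := hd
            have hji1 : j ≠ i + 1 := by
              intro h
              rw [h, charAt_at w (i+1) h1n] at hjv
              exact hd1 hjv
            have h2n : i + 2 < w.length := by omega
            have gB2 : charAt w ((i:Int)+2) = w[i+2] := by
              rw [show ((i:Int)+2) = (((i+2:Nat)):Int) by push_cast; ring]
              exact charAt_at w (i+2) h2n
            rw [if_neg (show ¬ ((PySem.Chars.isIn [charAt w ((i:Int)+1)] vowelsB
                    || (charAt w ((i:Int)+1) == 'h')) = true) by
                  rw [gB1, isIn_single]; simp [hd1, hd2]),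
                if_pos (show ((!(PySem.Set.contains vowelsSetA [charAt (w.drop i) 1]))
                    && (charAt (w.drop i) 1 != 'h')) = true by
                  rw [e1, gB1, containsA_single]; simp [hd1, hd2])]
            by_cases he : (w[i+2] ∈ vowelsB ∨ w[i+2] = 'h')
            · rw [if_pos (show (PySem.Chars.isIn [charAt w ((i:Int)+2)] vowelsB
                      || (charAt w ((i:Int)+2) == 'h')) = true by
                    rw [gB2, isIn_single]; rcases he with h | h <;> simp [h]),
                  if_neg (show ¬ (((!(PySem.Set.contains vowelsSetA [charAt (w.drop i) 2]))
                      && (charAt (w.drop i) 2 != 'h')) = true) by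
                    rw [e2, gB2, containsA_single]; rcases he with h | h <;> simp [h]),
                  sl2 w i, ih (i+2) (parts ++ [['^','-']]) (by omega) (by omega), joinApp]
            · push_neg at he
              obtain ⟨he1, he2⟩ := he
              have hji2 : j ≠ i + 2 := by
                intro h
                rw [h, charAt_at w (i+2) h2n] at hjv
                exact he1 hjv
              have h3n : i + 3 < w.length := by omega
              rw [if_neg (show ¬ ((PySem.Chars.isIn [charAt w ((i:Int)+2)] vowelsB
                      || (charAt w ((i:Int)+2) == 'h')) = true) by
                    rw [gB2, isIn_single]; simp [he1, he2]),
                  if_pos (show ((!(PySem.Set.contains vowelsSetA [charAt (w.drop i) 2]))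
                      && (charAt (w.drop i) 2 != 'h')) = true by
                    rw [e2, gB2, containsA_single]; simp [he1, he2]),
                  sl3 w i, ih (i+3) (parts ++ [['a','-']]) (by omega) (by omega), joinApp]
      · -- no vowel remains: both return prefix ++ 'a'
        have hile : lastVowelB w (w.length : Int) < (i:Int) := by
          rw [gt_last_iff]
          simpa using hv
        rw [loopB, findRhymeAux, dif_pos hin, dif_neg hsne, if_pos hile,
            containsAny_eq_any]
        simp only [Bool.not_eq_true] at hv
        rw [hv]
        simp only [Bool.not_false, if_pos]
        rw [joinApp]
    · exact loopB_terminal w _ i parts hin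

-- ===== VERDICT (by name: the statement is the Claim_ definition above) =====
theorem findRhyme_spec : Claim_equal_findRhyme := by
  intro word ansPrefix _ _
  unfold Spec_findRhyme findRhyme findRhyme_alt
  have h := main_loop word.toList word.toList.length 0 [ansPrefix.toList] (by omega) (by omega)
  simp only [h, List.drop_zero, join_nil_flatten, List.flatten_cons, List.flatten_nil, List.append_nil]
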